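-- pv_equiv track=rewrite | github.com/gerrodgon-byte/entrega1IS | funciones.py | producto
-- ===== SOURCE A (Python) =====
-- def producto(n:int, k:int) -> int:
--     ''' Devuelve el producto de n * (n+1) * ... * (n+k-1), siendo siempre n>=k y ambos enteros positivos. '''
--     if k < 0:
--         raise AssertionError("k debe ser mayor o igual que 0")
--     if n < k:
--         raise AssertionError("n debe ser mayor o igual que k")
--     resultado = 1
--     for i in range(k):
--         resultado *= (n + i)
--     return resultado
-- ===== SOURCE B (Python) =====
-- def producto(n: int, k: int) -> int:
--     if k < 0:
--         raise AssertionError("k debe ser mayor o igual que 0")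
--     if n < k:
--         raise AssertionError("n debe ser mayor o igual que k")
--     return _prod_range(n, n + k)
--
-- def _prod_range(a: int, b: int) -> int:
--     # product of the integers in [a, b), by balanced divide and conquer
--     if b - a <= 0:
--         return 1
--     if b - a == 1:
--         return a
--     m = a + (b - a) // 2
--     return _prod_range(a, m) * _prod_range(m, b)
-- ===== Notes on version B (the rewrite author's own statement) =====
-- stated objective: alternative
-- what changed: Replaces the left-to-right k-step multiplication loop with a balanced divide-and-conquer product over the range [n, n+k), which keeps the big-integer operands balanced in size.
import Mathlib
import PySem

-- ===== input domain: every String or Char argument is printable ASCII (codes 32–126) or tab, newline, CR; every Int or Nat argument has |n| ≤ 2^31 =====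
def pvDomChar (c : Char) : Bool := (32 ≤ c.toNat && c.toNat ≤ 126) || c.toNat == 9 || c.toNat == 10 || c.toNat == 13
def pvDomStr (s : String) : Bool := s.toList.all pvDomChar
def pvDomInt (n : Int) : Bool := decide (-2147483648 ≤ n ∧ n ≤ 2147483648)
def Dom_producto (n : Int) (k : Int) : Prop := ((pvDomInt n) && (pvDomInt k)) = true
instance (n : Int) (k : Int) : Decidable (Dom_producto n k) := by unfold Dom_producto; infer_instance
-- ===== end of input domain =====

-- B replaces A's linear multiplication loop by a balanced divide-and-conquer range product (alternative decomposition, same results).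

-- ===== PORT A =====
-- literal transliteration: guards, then resultado *= (n+i) over range(k)
def producto (n : Int) (k : Int) : Int :=
  if k < 0 then 0            -- raise AssertionError (outside Pre_)
  else if n < k then 0       -- raise AssertionError (outside Pre_)
  else (PySem.List.pyRange 0 k 1).foldl (fun resultado i => resultado * (n + i)) 1

-- ===== PORT B =====
-- _prod_range(a, b): product of the integers in [a, b), balanced divide and conquer
def prodRangeB (a b : Int) : Int :=
  if b - a ≤ 0 then 1
  else if b - a = 1 then a
  else
    let m := a + PySem.Int.floordiv (b - a) 2
    prodRangeB a m * prodRangeB m b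
termination_by (b - a).toNat
decreasing_by
  · have h2 : PySem.Int.floordiv (b - a) 2 = (b - a) / 2 :=
      PySem.Int.floordiv_eq_ediv_of_pos (by omega)
    simp only [h2]; omega
  · have h2 : PySem.Int.floordiv (b - a) 2 = (b - a) / 2 :=
      PySem.Int.floordiv_eq_ediv_of_pos (by omega)
    simp only [h2]; omega

def producto_alt (n : Int) (k : Int) : Int :=
  if k < 0 then 0            -- raise AssertionError (outside Pre_)
  else if n < k then 0       -- raise AssertionError (outside Pre_)
  else prodRangeB n (n + k)

-- ===== PRECONDITION & SPEC =====
-- Pre_ excludes exactly the inputs where A raises AssertionError (k < 0, or n < k)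
def Pre_producto (n : Int) (k : Int) : Prop := 0 ≤ k ∧ k ≤ n
instance (n : Int) (k : Int) : Decidable (Pre_producto n k) := by unfold Pre_producto; infer_instance
def pvWitness_producto : Int × Int := (5, 3)

def Spec_producto (n : Int) (k : Int) (out : Int) : Prop := out = producto_alt n k
instance (n : Int) (k : Int) (out : Int) : Decidable (Spec_producto n k out) := by unfold Spec_producto; infer_instance

-- ===== CLAIM (what is proved, stated in full; the proofs are below) =====
def Claim_equal_producto : Prop := ∀ (n : Int) (k : Int), Dom_producto n k → Pre_producto n k → Spec_producto n k (producto n k)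

-- ===== LEMMAS AND PROOFS =====

-- pvF a c = a * (a+1) * ... * (a+c-1), accumulated left to right (the common reference shape)
def pvF (a : Int) : Nat → Int
  | 0 => 1
  | c + 1 => pvF a c * (a + c)

theorem pvF_add (a : Int) (c d : Nat) : pvF a (c + d) = pvF a c * pvF (a + c) d := by
  induction d with
  | zero => simp [pvF]
  | succ d ih =>
      have : c + (d + 1) = (c + d) + 1 := by omega
      rw [this]
      simp only [pvF, ih]
      push_cast
      ring

theorem prodRangeB_eq (a b : Int) : prodRangeB a b = pvF a (b - a).toNat := by
  generalize hN : (b - a).toNat = N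
  induction N using Nat.strong_induction_on generalizing a b with
  | _ N ih =>
    rw [prodRangeB]
    by_cases h0 : b - a ≤ 0
    · have : N = 0 := by omega
      simp [h0, this, pvF]
    · by_cases h1 : b - a = 1
      · have : N = 1 := by omega
        simp [h1, this, pvF]
      · have hge : 2 ≤ b - a := by omega
        have h2 : PySem.Int.floordiv (b - a) 2 = (b - a) / 2 :=
          PySem.Int.floordiv_eq_ediv_of_pos (by omega)
        simp only [h0, h1, if_false, h2]
        set m := a + (b - a) / 2 with hm
        have hq1 : 1 ≤ (b - a) / 2 := by omega
        have hq2 : (b - a) / 2 < b - a := by omega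
        have hc : (m - a).toNat < N := by omega
        have hd : (b - m).toNat < N := by omega
        rw [ih _ hc a m rfl, ih _ hd m b rfl]
        have hsum : (m - a).toNat + (b - m).toNat = N := by omega
        have ham : a + ((m - a).toNat : Int) = m := by omega
        rw [← hsum, pvF_add, ham]

theorem foldl_pyRange_eq_pvF (n : Int) (kn : Nat) :
    (PySem.List.pyRange 0 (kn : Int) 1).foldl (fun r i => r * (n + i)) 1 = pvF n kn := by
  rw [PySem.List.pyRange_zero_natCast]
  induction kn with
  | zero => simp [pvF]
  | succ m ih =>
      rw [List.range_succ, List.map_append, List.foldl_append, ih]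
      simp [pvF]

-- ===== VERDICT (by name: the statement is the Claim_ definition above) =====
theorem producto_spec : Claim_equal_producto := by
  intro n k _ hpre
  obtain ⟨hk, hnk⟩ := hpre
  unfold Spec_producto producto producto_alt
  have hk' : ¬ k < 0 := by omega
  have hn' : ¬ n < k := by omega
  simp only [hk', hn', if_false]
  rw [prodRangeB_eq]
  have hkk : n + k - n = k := by ring
  rw [hkk]
  obtain ⟨kn, rfl⟩ := Int.eq_ofNat_of_zero_le hk
  rw [Int.toNat_natCast]
  exact foldl_pyRange_eq_pvF n kn
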